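-- pv_equiv track=rewrite | github.com/AymanGosh/google-reichman-program | 00-Algocode/ex3.py | heap_find
-- ===== SOURCE A (Python) =====
-- def heap_find(A, z):
--     stack = [0]
--     while stack:
--         i = stack.pop()
--         if i >= len(A):
--             continue
--         if A[i] > z:
--             continue
--         if A[i] == z:
--             return i
--         stack.append(2 * i + 2)  # Go R
--         stack.append(2 * i + 1)  # Go L
--     return None
-- ===== SOURCE B (Python) =====
-- def heap_find(A, z):
--     def go(i):
--         if i >= len(A) or A[i] > z:
--             return None
--         if A[i] == z:
--             return i
--         res = go(2 * i + 1)
--         return res if res is not None else go(2 * i + 2)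
--     return go(0)
-- ===== Notes on version B (the rewrite author's own statement) =====
-- stated objective: simpler
-- what changed: Replaces the explicit-stack iterative DFS with direct recursion over the implicit heap tree (left child first, orElse the right), eliminating the stack data structure.
import Mathlib
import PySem

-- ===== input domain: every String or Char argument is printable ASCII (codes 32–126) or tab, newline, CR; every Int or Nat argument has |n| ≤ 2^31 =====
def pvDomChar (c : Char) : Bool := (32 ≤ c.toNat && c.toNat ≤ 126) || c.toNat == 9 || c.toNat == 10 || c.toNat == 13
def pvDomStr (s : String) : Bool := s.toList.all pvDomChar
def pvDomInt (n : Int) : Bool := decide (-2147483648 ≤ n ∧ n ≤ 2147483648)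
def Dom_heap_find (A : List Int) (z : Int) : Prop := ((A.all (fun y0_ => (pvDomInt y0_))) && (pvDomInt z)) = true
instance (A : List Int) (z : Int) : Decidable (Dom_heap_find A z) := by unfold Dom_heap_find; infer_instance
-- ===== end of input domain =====

-- B replaces A's explicit-stack iterative DFS with direct recursion over the implicit heap tree (simpler decomposition, same traversal order and result).


-- ===== PORT A =====
-- termination lemmas (named so the ports' bodies stay small; cited from decreasing_by)
theorem pvDecL {n i : Nat} (h : i < n) : n - (2 * i + 1) < n - i := by omega
theorem pvDecR {n i : Nat} (h : i < n) : n - (2 * i + 2) < n - i := by omega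

-- size of the part of the subtree rooted at index i that lies inside the array (termination measure only)
def pvSub (n i : Nat) : Nat :=
  if i < n then pvSub n (2 * i + 1) + pvSub n (2 * i + 2) + 1 else 0
termination_by n - i
decreasing_by
  · exact pvDecL (by assumption)
  · exact pvDecR (by assumption)

theorem pvSub_step {n i : Nat} (h : i < n) : pvSub n i = pvSub n (2 * i + 1) + pvSub n (2 * i + 2) + 1 := by
  rw [pvSub]; simp [h]

theorem pvMeasPop {f : Nat → Nat} {i : Nat} {rest : List Nat} :
    2 * (rest.map f).sum + rest.length < 2 * ((i :: rest).map f).sum + (i :: rest).length := by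
  simp [List.map_cons]; omega
theorem pvMeasPush {f : Nat → Nat} {i j k : Nat} {rest : List Nat} (h : f i = f j + f k + 1) :
    2 * ((j :: k :: rest).map f).sum + (j :: k :: rest).length <
      2 * ((i :: rest).map f).sum + (i :: rest).length := by
  simp [List.map_cons]; omega

-- the while loop of A: pop i from the stack, skip / prune / return / push children (right then left, so left is popped first)
def heapFindLoop (A : List Int) (z : Int) (stack : List Nat) : Option Int :=
  match stack with
  | [] => none
  | i :: rest =>
    if h : i ≥ A.length then heapFindLoop A z rest
    else if A[i] > z then heapFindLoop A z rest
    else if A[i] = z then some (i : Int)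
    else heapFindLoop A z ((2 * i + 1) :: (2 * i + 2) :: rest)
termination_by 2 * (stack.map (pvSub A.length)).sum + stack.length
decreasing_by
  · exact pvMeasPop
  · exact pvMeasPop
  · exact pvMeasPush (pvSub_step (Nat.lt_of_not_le h))

def heap_find (A : List Int) (z : Int) : Option Int := heapFindLoop A z [0]

-- ===== PORT B =====
-- recursive DFS over the implicit heap tree: prune when out of range or A[i] > z, left child first
def heapFindGo (A : List Int) (z : Int) (i : Nat) : Option Int :=
  if h : i ≥ A.length then none  -- `i >= len(A) or A[i] > z`, with `or` short-circuit as nested ifs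
  else if A[i]'(Nat.lt_of_not_le h) > z then none
  else if A[i]'(Nat.lt_of_not_le h) = z then some (i : Int)
  else match heapFindGo A z (2 * i + 1) with
    | some r => some r
    | none => heapFindGo A z (2 * i + 2)
termination_by A.length - i
decreasing_by
  · exact pvDecL (Nat.lt_of_not_le h)
  · exact pvDecR (Nat.lt_of_not_le h)

def heap_find_alt (A : List Int) (z : Int) : Option Int := heapFindGo A z 0

-- ===== PRECONDITION & SPEC =====
def Spec_heap_find (A : List Int) (z : Int) (out : Option Int) : Prop := out = heap_find_alt A z
instance (A : List Int) (z : Int) (out : Option Int) : Decidable (Spec_heap_find A z out) := by unfold Spec_heap_find; infer_instance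

-- ===== CLAIM (what is proved, stated in full; the proofs are below) =====
def Claim_equal_heap_find : Prop := ∀ (A : List Int) (z : Int), Dom_heap_find A z → Spec_heap_find A z (heap_find A z)

-- ===== LEMMAS AND PROOFS =====
-- the loop processes the stack as a left-to-right fold of the recursive DFS
theorem heapFindLoop_eq_foldr (A : List Int) (z : Int) (stack : List Nat) :
    heapFindLoop A z stack = stack.foldr (fun i acc => (heapFindGo A z i).orElse (fun _ => acc)) none := by
  fun_induction heapFindLoop A z stack with
  | case1 => simp
  | case2 i rest h ih =>
    rw [ih]
    have : heapFindGo A z i = none := by rw [heapFindGo]; simp [h]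
    simp [List.foldr, this]
  | case3 i rest h hgt ih =>
    rw [ih]
    have : heapFindGo A z i = none := by rw [heapFindGo]; simp [h, hgt]
    simp [List.foldr, this]
  | case4 i rest h hgt heq =>
    have : heapFindGo A z i = some (i : Int) := by rw [heapFindGo]; simp [h, heq]
    simp [List.foldr, this]
  | case5 i rest h hgt hne ih =>
    rw [ih]
    have hgo : heapFindGo A z i =
        (heapFindGo A z (2 * i + 1)).orElse (fun _ => heapFindGo A z (2 * i + 2)) := by
      rw [heapFindGo]; simp [h, hgt, hne]
      cases heapFindGo A z (2 * i + 1) <;> simp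
    simp only [List.foldr, hgo]
    cases heapFindGo A z (2 * i + 1) <;> simp

theorem heap_find_spec : Claim_equal_heap_find := by
  intro A z _
  unfold Spec_heap_find heap_find heap_find_alt
  rw [heapFindLoop_eq_foldr]
  cases hg : heapFindGo A z 0 <;> simp [List.foldr, hg]
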